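-- pv_equiv track=rewrite | github.com/kodsnack/advent_of_code_2017 | meldanya-python3/day21/day21.py | _to_binary_number
-- ===== SOURCE A (Python) =====
-- def _flatten(li):
--     return [item for sl in li for item in sl]
--
-- def _to_binary_number(li):
--     li = _flatten(li)
--     n = 0
--     x = len(li)
--     for i in li:
--         n += i*2**(x-1)
--         x -= 1
--     return n
-- ===== SOURCE B (Python) =====
-- def _to_binary_number(li):
--     n = 0
--     for row in li:
--         for bit in row:
--             n = n * 2 + bit
--     return n
-- ===== Notes on version B (the rewrite author's own statement) =====
-- stated objective: faster
-- what changed: Replaces flatten + per-bit power computation 2**(x-1) with a single Horner pass n = n*2 + bit over the nested lists (no flattening, no exponentiation).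
import Mathlib
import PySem

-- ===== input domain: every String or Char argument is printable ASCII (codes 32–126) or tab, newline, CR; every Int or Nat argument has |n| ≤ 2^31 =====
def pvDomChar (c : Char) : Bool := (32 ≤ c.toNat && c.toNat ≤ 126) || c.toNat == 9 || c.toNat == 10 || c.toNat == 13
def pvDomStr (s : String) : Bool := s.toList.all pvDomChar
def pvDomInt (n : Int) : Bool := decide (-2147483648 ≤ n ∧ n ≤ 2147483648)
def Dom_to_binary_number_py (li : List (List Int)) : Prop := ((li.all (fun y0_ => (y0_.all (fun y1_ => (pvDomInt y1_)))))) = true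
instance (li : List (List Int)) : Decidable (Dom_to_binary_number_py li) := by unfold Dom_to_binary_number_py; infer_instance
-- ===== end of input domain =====

-- B replaces A's flatten + per-bit power 2**(x-1) with a single Horner pass n = n*2 + bit (faster by a constant/asymptotic bit-op mechanism; equivalence proved below).


-- ===== PORT A =====
-- _flatten: [item for sl in li for item in sl]
def pvFlatten (li : List (List Int)) : List Int := li.flatMap (fun sl => sl.map (fun item => item))

-- the for-loop of A: state (n, x); 'i*2**(x-1)'. During the loop x ≥ 1, so the
-- exponent x-1 is never negative and (x-1).toNat is exact there.
def pvALoop : List Int → Int → Int → Int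
  | [], n, _ => n
  | i :: rest, n, x => pvALoop rest (n + i * (2 : Int) ^ (x - 1).toNat) (x - 1)

def to_binary_number_py (li : List (List Int)) : Int :=
  let l := pvFlatten li
  pvALoop l 0 (l.length : Int)

-- ===== PORT B =====
-- inner loop of B over one row
def pvBRow (n : Int) (row : List Int) : Int := row.foldl (fun n bit => n * 2 + bit) n

def to_binary_number_py_alt (li : List (List Int)) : Int := li.foldl pvBRow 0

-- ===== PRECONDITION & SPEC =====
def Spec_to_binary_number_py (li : List (List Int)) (out : Int) : Prop := out = to_binary_number_py_alt li
instance (li : List (List Int)) (out : Int) : Decidable (Spec_to_binary_number_py li out) := by unfold Spec_to_binary_number_py; infer_instance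

-- ===== CLAIM (what is proved, stated in full; the proofs are below) =====
def Claim_equal_to_binary_number_py : Prop := ∀ (li : List (List Int)), Dom_to_binary_number_py li → Spec_to_binary_number_py li (to_binary_number_py li)

-- ===== LEMMAS AND PROOFS =====

-- Horner fold with accumulator a shifts the zero-accumulator result by a·2^len
theorem horner_shift (l : List Int) : ∀ (a : Int),
    l.foldl (fun n bit => n * 2 + bit) a
      = a * 2 ^ l.length + l.foldl (fun n bit => n * 2 + bit) 0 := by
  induction l with
  | nil => intro a; simp
  | cons b t ih =>
    intro a
    simp only [List.foldl_cons, List.length_cons]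
    rw [ih (a * 2 + b), ih (0 * 2 + b)]
    ring

-- A's loop, started at x = length, adds the Horner value of the list to n
theorem aLoop_eq (l : List Int) : ∀ (n : Int),
    pvALoop l n (l.length : Int) = n + l.foldl (fun n bit => n * 2 + bit) 0 := by
  induction l with
  | nil => intro n; simp [pvALoop]
  | cons b t ih =>
    intro n
    have hx : ((((b :: t).length : Int)) - 1).toNat = t.length := by
      simp
    show pvALoop t (n + b * (2 : Int) ^ ((((b :: t).length : Int)) - 1).toNat)
          ((((b :: t).length : Int)) - 1) = _
    rw [hx]
    have hlen : (((b :: t).length : Int)) - 1 = (t.length : Int) := by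
      simp
    rw [hlen, ih]
    simp only [List.foldl_cons]
    rw [horner_shift t (0 * 2 + b)]
    ring

-- folding Horner over the flattened list = folding row-by-row
theorem flat_fold (li : List (List Int)) : ∀ (a : Int),
    (pvFlatten li).foldl (fun n bit => n * 2 + bit) a = li.foldl pvBRow a := by
  induction li with
  | nil => intro a; simp [pvFlatten]
  | cons r t ih =>
    intro a
    simp only [pvFlatten, List.flatMap_cons, List.foldl_append, List.foldl_cons] at *
    rw [show (r.map fun item => item) = r from by simp]
    exact ih _

-- ===== VERDICT (by name: the statement is the Claim_ definition above) =====
theorem to_binary_number_py_spec : Claim_equal_to_binary_number_py := by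
  intro li _
  show to_binary_number_py li = to_binary_number_py_alt li
  unfold to_binary_number_py to_binary_number_py_alt
  rw [aLoop_eq, ← flat_fold]
  simp
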